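-- pv_equiv track=rewrite | github.com/CrisTowi/RSA | decryp.py | blocks2numList
-- ===== SOURCE A (Python) =====
-- import copy
--
-- def blocks2numList(blocks,n):
--     '''inverse function of numList2blocks.'''
--     toProcess = copy.copy(blocks)
--     returnList = []
--     for numBlock in toProcess:
--         inner = []
--         for i in range(0, n):
--             inner.append(numBlock)
--             numBlock >>= 8
--         inner.reverse()
--         returnList.extend(inner)
--     return returnList
-- ===== SOURCE B (Python) =====
-- def blocks2numList(blocks, n):
--     '''inverse function of numList2blocks.'''
--     # Column-wise: build n rows, row k holding every block shifted right by 8*k,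
--     # then transpose (zip) so each block's values come out most-significant first.
--     rows = []
--     shifted = list(blocks)
--     for _ in range(n):
--         rows.append(shifted)
--         shifted = [x >> 8 for x in shifted]
--     rows.reverse()
--     out = []
--     for tup in zip(*rows):
--         out.extend(tup)
--     return out
-- ===== Notes on version B (the rewrite author's own statement) =====
-- stated objective: alternative
-- what changed: Replaces A's per-block inner shift loop (running numBlock >>= 8 accumulator, temporary inner list, reverse per block) by a column-wise construction: n staged rows, each the whole block list shifted right by 8 once more, then reversed and transposed with zip so each block's values come out most-significant first.
import Mathlib
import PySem

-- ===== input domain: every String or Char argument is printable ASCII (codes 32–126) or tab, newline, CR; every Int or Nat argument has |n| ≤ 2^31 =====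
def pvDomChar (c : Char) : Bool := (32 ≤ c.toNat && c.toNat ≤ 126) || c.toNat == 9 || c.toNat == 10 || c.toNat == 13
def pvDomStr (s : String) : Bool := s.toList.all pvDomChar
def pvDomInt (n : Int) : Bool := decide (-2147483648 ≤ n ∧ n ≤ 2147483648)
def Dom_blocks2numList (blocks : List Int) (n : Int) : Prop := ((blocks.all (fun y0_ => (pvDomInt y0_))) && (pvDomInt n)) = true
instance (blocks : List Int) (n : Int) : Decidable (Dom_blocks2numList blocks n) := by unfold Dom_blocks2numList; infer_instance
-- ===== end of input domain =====

-- B replaces A's per-block inner loop (running `numBlock >>= 8` accumulator + reverse)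
-- by a column-wise construction: n staged rows, each the whole block list shifted by 8
-- once more, reversed and then transposed via zip (objective: alternative decomposition).

-- ===== PORT A =====
-- inner loop: 'for i in range(0, n): inner.append(numBlock); numBlock >>= 8'; state = (inner, numBlock)
def blocks2numList (blocks : List Int) (n : Int) : List Int :=
  blocks.foldl (fun returnList numBlock =>
    let st := (PySem.List.pyRange 0 n 1).foldl
      (fun (st : List Int × Int) _ => (st.1 ++ [st.2], st.2 >>> (8 : Nat))) ([], numBlock)
    returnList ++ st.1.reverse) []

-- ===== PORT B =====
-- 'for tup in zip(*rows)' ported by hand: pvPop takes one element off every row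
-- (none when there are no rows or some row is exhausted — exactly zip's stop rule).
def pvPop : List (List Int) → Option (List Int × List (List Int))
  | [] => none
  | r :: rs =>
    match r with
    | [] => none
    | h :: t =>
      match rs with
      | [] => some ([h], [t])
      | r' :: rs' =>
        match pvPop (r' :: rs') with
        | none => none
        | some (hs, ts) => some (h :: hs, t :: ts)

-- termination measure for pvZipFlat: pvPop strictly shrinks the total length
theorem pvPop_sum (rows : List (List Int)) (hs : List Int) (ts : List (List Int))
    (h : pvPop rows = some (hs, ts)) :
    (ts.map List.length).sum < (rows.map List.length).sum := by
  induction rows generalizing hs ts with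
  | nil => simp [pvPop] at h
  | cons r rs ih =>
    match r with
    | [] => simp [pvPop] at h
    | a :: t =>
      match rs with
      | [] =>
        simp [pvPop] at h
        obtain ⟨h1, h2⟩ := h
        subst h1; subst h2
        simp
      | r' :: rs' =>
        simp only [pvPop] at h
        cases hp : pvPop (r' :: rs') with
        | none => rw [hp] at h; simp at h
        | some p =>
          rw [hp] at h
          obtain ⟨hs', ts'⟩ := p
          simp at h
          obtain ⟨h1, h2⟩ := h
          subst h1; subst h2
          have := ih hs' ts' hp
          simp at this ⊢
          omega

def pvZipFlat (rows : List (List Int)) : List Int :=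
  match h : pvPop rows with
  | none => []
  | some (hs, ts) => hs ++ pvZipFlat ts
termination_by (rows.map List.length).sum
decreasing_by exact pvPop_sum _ _ _ h

-- B: rows built in n stages (each stage shifts every block by 8 more), reversed, transposed
def blocks2numList_alt (blocks : List Int) (n : Int) : List Int :=
  let st := (PySem.List.pyRange 0 n 1).foldl
    (fun (st : List (List Int) × List Int) _ =>
      (st.1 ++ [st.2], st.2.map (fun (x : Int) => x >>> (8 : Nat)))) ([], blocks)
  pvZipFlat st.1.reverse

-- ===== PRECONDITION & SPEC =====
def Spec_blocks2numList (blocks : List Int) (n : Int) (out : List Int) : Prop := out = blocks2numList_alt blocks n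
instance (blocks : List Int) (n : Int) (out : List Int) : Decidable (Spec_blocks2numList blocks n out) := by unfold Spec_blocks2numList; infer_instance

-- ===== CLAIM (what is proved, stated in full; the proofs are below) =====
def Claim_equal_blocks2numList : Prop := ∀ (blocks : List Int) (n : Int), Dom_blocks2numList blocks n → Spec_blocks2numList blocks n (blocks2numList blocks n)

-- ===== LEMMAS AND PROOFS =====

-- A's inner loop characterised: after the loop inner = [b, b>>8, …] and numBlock fully shifted
theorem pv_inner_fold (l : List Unit) (acc : List Int) (b : Int) :
    (l.foldl (fun (st : List Int × Int) _ => (st.1 ++ [st.2], st.2 >>> (8 : Nat))) (acc, b))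
      = (acc ++ (List.range l.length).map (fun (i : Nat) => b >>> ((8 * i : Nat))), b >>> ((8 * l.length : Nat))) := by
  induction l generalizing acc b with
  | nil => simp
  | cons _ t ih =>
      simp only [List.foldl_cons, ih, List.length_cons]
      rw [Prod.mk.injEq]
      refine ⟨?_, ?_⟩
      · rw [List.range_succ_eq_map, List.map_cons, List.map_map, List.append_assoc,
          List.singleton_append]
        simp only [Nat.mul_zero, Int.shiftRight_zero]
        congr 2
        refine List.map_congr_left (fun i _ => ?_)
        show (b >>> (8 : Nat)) >>> ((8 * i : Nat)) = b >>> ((8 * (i + 1) : Nat))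
        rw [← Int.shiftRight_add]
        congr 1
        ring
      · rw [← Int.shiftRight_add]
        congr 1
        ring

-- the fold over pyRange only uses the range's LENGTH; restate pv_inner_fold for it
theorem pv_inner_fold_range (n : Int) (b : Int) :
    ((PySem.List.pyRange 0 n 1).foldl
      (fun (st : List Int × Int) _ => (st.1 ++ [st.2], st.2 >>> (8 : Nat))) ([], b)).1
      = (List.range n.toNat).map (fun (i : Nat) => b >>> ((8 * i : Nat))) := by
  have h : (PySem.List.pyRange 0 n 1).foldl
      (fun (st : List Int × Int) _ => (st.1 ++ [st.2], st.2 >>> (8 : Nat))) ([], b)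
      = ((PySem.List.pyRange 0 n 1).map (fun _ => ())).foldl
      (fun (st : List Int × Int) _ => (st.1 ++ [st.2], st.2 >>> (8 : Nat))) ([], b) := by
    rw [List.foldl_map]
  rw [h, pv_inner_fold]
  simp [PySem.List.length_pyRange_one]

-- B's row loop characterised: row k is the whole block list shifted by 8*k
theorem pv_rows_fold (l : List Unit) (acc : List (List Int)) (cur : List Int) :
    (l.foldl (fun (st : List (List Int) × List Int) _ =>
        (st.1 ++ [st.2], st.2.map (fun (x : Int) => x >>> (8 : Nat)))) (acc, cur))
      = (acc ++ (List.range l.length).map (fun (k : Nat) => cur.map (fun (x : Int) => x >>> ((8 * k : Nat)))),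
         cur.map (fun (x : Int) => x >>> ((8 * l.length : Nat)))) := by
  induction l generalizing acc cur with
  | nil => simp
  | cons _ t ih =>
      simp only [List.foldl_cons, ih, List.length_cons]
      rw [Prod.mk.injEq]
      refine ⟨?_, ?_⟩
      · rw [List.range_succ_eq_map, List.map_cons, List.map_map, List.append_assoc,
          List.singleton_append]
        simp only [Nat.mul_zero, Int.shiftRight_zero]
        congr 2
        · simp
        · refine List.map_congr_left (fun k _ => ?_)
          show (cur.map (fun (x : Int) => x >>> (8 : Nat))).map (fun (x : Int) => x >>> ((8 * k : Nat)))
              = cur.map (fun (x : Int) => x >>> ((8 * (k + 1) : Nat)))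
          rw [List.map_map]
          refine List.map_congr_left (fun x _ => ?_)
          show (x >>> (8 : Nat)) >>> ((8 * k : Nat)) = x >>> ((8 * (k + 1) : Nat))
          rw [← Int.shiftRight_add]
          congr 1
          ring
      · rw [List.map_map]
        refine List.map_congr_left (fun x _ => ?_)
        show (x >>> (8 : Nat)) >>> ((8 * t.length : Nat)) = x >>> ((8 * (t.length + 1) : Nat))
        rw [← Int.shiftRight_add]
        congr 1
        ring

theorem pv_rows_fold_range (n : Int) (blocks : List Int) :
    ((PySem.List.pyRange 0 n 1).foldl
      (fun (st : List (List Int) × List Int) _ =>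
        (st.1 ++ [st.2], st.2.map (fun (x : Int) => x >>> (8 : Nat)))) ([], blocks)).1
      = (List.range n.toNat).map (fun (k : Nat) => blocks.map (fun (x : Int) => x >>> ((8 * k : Nat)))) := by
  have h : (PySem.List.pyRange 0 n 1).foldl
      (fun (st : List (List Int) × List Int) _ =>
        (st.1 ++ [st.2], st.2.map (fun (x : Int) => x >>> (8 : Nat)))) ([], blocks)
      = ((PySem.List.pyRange 0 n 1).map (fun _ => ())).foldl
      (fun (st : List (List Int) × List Int) _ =>
        (st.1 ++ [st.2], st.2.map (fun (x : Int) => x >>> (8 : Nat)))) ([], blocks) := by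
    rw [List.foldl_map]
  rw [h, pv_rows_fold]
  simp [PySem.List.length_pyRange_one]

-- pvPop on rows that all start with an element: heads and tails, provided there is a row
theorem pvPop_map_cons {κ : Type} (ks : List κ) (h t : κ → List Int) (x : κ → Int)
    (hne : ks ≠ []) :
    pvPop (ks.map (fun k => x k :: (h k))) = some (ks.map x, ks.map h) := by
  induction ks with
  | nil => exact absurd rfl hne
  | cons k ks ih =>
    cases ks with
    | nil => simp [pvPop]
    | cons k' ks' =>
      have := ih (by simp)
      simp only [List.map_cons] at this ⊢
      simp only [pvPop, this]

-- pvPop on an empty transposition input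
theorem pvPop_all_nil {κ : Type} (ks : List κ) :
    pvPop (ks.map (fun _ => ([] : List Int))) = none := by
  cases ks with
  | nil => simp [pvPop]
  | cons k ks => cases ks <;> simp [pvPop]

-- the transpose-and-flatten of columnwise rows equals the per-block flatMap
theorem pv_zipflat_transpose {κ : Type} (g : κ → Int → Int) (ks : List κ) (blocks : List Int) :
    pvZipFlat (ks.map (fun k => blocks.map (g k)))
      = blocks.flatMap (fun b => ks.map (fun k => g k b)) := by
  induction blocks with
  | nil =>
    rw [pvZipFlat]
    simp only [List.map_nil]
    rw [pvPop_all_nil]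
    simp
  | cons b bs ih =>
    cases hks : ks with
    | nil =>
      rw [pvZipFlat]
      simp [pvPop]
    | cons k0 ks' =>
      rw [← hks]
      have hne : ks ≠ [] := by rw [hks]; simp
      rw [pvZipFlat]
      simp only [List.map_cons]
      rw [pvPop_map_cons ks (fun k => bs.map (g k)) (fun k => bs.map (g k)) (fun k => g k b) hne]
      simp only [ih, List.flatMap_cons]

-- ===== VERDICT (by name: the statement is the Claim_ definition above) =====
theorem blocks2numList_spec : Claim_equal_blocks2numList := by
  intro blocks n _
  unfold Spec_blocks2numList blocks2numList blocks2numList_alt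
  -- A's side: per-block reversed shift list, flattened
  have hA : ∀ (numBlock : Int),
      (((PySem.List.pyRange 0 n 1).foldl
        (fun (st : List Int × Int) _ => (st.1 ++ [st.2], st.2 >>> (8 : Nat))) ([], numBlock)).1).reverse
      = ((List.range n.toNat).reverse).map (fun (i : Nat) => numBlock >>> ((8 * i : Nat))) := by
    intro b
    rw [pv_inner_fold_range, List.map_reverse]
  simp only [hA]
  rw [PySem.List.foldl_append_eq_flatMap]
  -- B's side: rows characterised, reversed, transposed
  rw [pv_rows_fold_range, ← List.map_reverse, pv_zipflat_transpose]
  simp
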